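-- pv_equiv track=rewrite | github.com/MrBrantCode/unitest_baseline | mut_generate/mist_train_cf/cf_47451/solution.py | even_prime_numbers
-- ===== SOURCE A (Python) =====
-- def even_prime_numbers(limit):
--     def is_prime(n):
--         if n <= 1:
--             return False
--         if n == 2:
--             return True
--         if n % 2 == 0:
--             return False
--
--         i = 3
--         while i * i <= n:
--             if n % i == 0:
--                 return False
--             i += 2
--
--         return True
--
--     even_primes = [i for i in range(2, limit+1) if is_prime(i) and i%2 == 0]
--     cum_sum = sum(even_primes)
--     return cum_sum
-- ===== SOURCE B (Python) =====
-- def even_prime_numbers(limit):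
--     # 2 is the only even prime, so the sum is 2 iff the range reaches 2.
--     return 2 if limit >= 2 else 0
-- ===== Notes on version B (the rewrite author's own statement) =====
-- stated objective: faster
-- what changed: Replaced the trial-division scan over range(2, limit+1) by the closed form: 2 is the only even prime, so return 2 if limit >= 2 else 0.
import Mathlib
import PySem

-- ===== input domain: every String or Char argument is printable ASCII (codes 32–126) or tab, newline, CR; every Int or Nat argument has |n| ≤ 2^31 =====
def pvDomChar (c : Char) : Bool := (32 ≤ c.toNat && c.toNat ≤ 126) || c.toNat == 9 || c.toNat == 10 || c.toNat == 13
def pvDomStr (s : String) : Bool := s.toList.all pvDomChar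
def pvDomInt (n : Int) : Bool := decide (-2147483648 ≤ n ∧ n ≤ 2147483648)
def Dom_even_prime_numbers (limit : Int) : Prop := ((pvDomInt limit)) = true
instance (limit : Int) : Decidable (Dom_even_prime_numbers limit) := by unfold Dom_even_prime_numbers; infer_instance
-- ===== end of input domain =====

-- B replaces A's trial-division scan by the closed form (2 is the only even prime); objective: faster.

-- ===== PORT A =====
-- the inner while loop of is_prime: i = 3; while i*i <= n: …; i += 2
def pvIsPrimeLoop (n : Int) (i : Int) : Bool :=
  if h : i * i ≤ n then
    if PySem.Int.mod n i = 0 then false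
    else pvIsPrimeLoop n (i + 2)
  else true
termination_by (n + 2 - i).toNat
decreasing_by
  have hi : i ≤ n := by nlinarith [sq_nonneg i, sq_nonneg (i - 1)]
  omega

def pvIsPrime (n : Int) : Bool :=
  if n ≤ 1 then false
  else if n = 2 then true
  else if PySem.Int.mod n 2 = 0 then false
  else pvIsPrimeLoop n 3

def even_prime_numbers (limit : Int) : Int :=
  let even_primes :=
    (PySem.List.pyRange 2 (limit + 1) 1).filter
      (fun i => pvIsPrime i && (PySem.Int.mod i 2 == 0))
  even_primes.sum

-- ===== PORT B =====
def even_prime_numbers_alt (limit : Int) : Int :=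
  if 2 ≤ limit then 2 else 0

-- ===== PRECONDITION & SPEC =====
def Spec_even_prime_numbers (limit : Int) (out : Int) : Prop := out = even_prime_numbers_alt limit
instance (limit : Int) (out : Int) : Decidable (Spec_even_prime_numbers limit out) := by unfold Spec_even_prime_numbers; infer_instance

-- ===== CLAIM (what is proved, stated in full; the proofs are below) =====
def Claim_equal_even_prime_numbers : Prop := ∀ (limit : Int), Dom_even_prime_numbers limit → Spec_even_prime_numbers limit (even_prime_numbers limit)

-- ===== LEMMAS AND PROOFS =====

-- every i ≥ 3 fails the comprehension's test: odd i fails i%2==0, even i ≥ 4 fails is_prime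
theorem pv_pred_false (i : Int) (h : 3 ≤ i) :
    (pvIsPrime i && (PySem.Int.mod i 2 == 0)) = false := by
  have hm : PySem.Int.mod i 2 = i % 2 := PySem.Int.mod_eq_emod_of_pos (by norm_num)
  by_cases he : i % 2 = 0
  · have : pvIsPrime i = false := by
      unfold pvIsPrime
      rw [if_neg (by omega), if_neg (by omega), hm, if_pos he]
    simp [this]
  · simp [he]

theorem even_prime_numbers_eq (limit : Int) :
    even_prime_numbers limit = even_prime_numbers_alt limit := by
  unfold even_prime_numbers even_prime_numbers_alt
  by_cases h2 : 2 ≤ limit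
  · rw [PySem.List.pyRange_one_cons (by omega : (2:Int) < limit + 1)]
    have htail : (PySem.List.pyRange (2 + 1) (limit + 1) 1).filter
        (fun i => pvIsPrime i && (PySem.Int.mod i 2 == 0)) = [] := by
      rw [List.filter_eq_nil_iff]
      intro x hx
      have := (PySem.List.mem_pyRange_one.mp hx).1
      simpa using pv_pred_false x (by omega)
    have h2t : (pvIsPrime 2 && (PySem.Int.mod 2 2 == 0)) = true := by decide
    rw [List.filter_cons]
    rw [if_pos h2t, htail]
    simp [h2]
  · rw [PySem.List.pyRange_one_eq_nil (by omega : limit + 1 ≤ 2)]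
    simp [h2]

-- ===== VERDICT (by name: the statement is the Claim_ definition above) =====
theorem even_prime_numbers_spec : Claim_equal_even_prime_numbers := by
  intro limit _
  exact even_prime_numbers_eq limit
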